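-- pv_equiv track=rewrite | github.com/harper-yuan/SemiHoRGod | test_HoRGod/test.py | netmp_sim
-- ===== SOURCE A (Python) =====
-- def netmp_sim(n = 4, party = 0, localhost = False):
--     ios = [-1 for i in range(n)]
--     ios2 = [-1 for i in range(n)]
--
--     for i in range(n):
--         for j in range(i+1,n):
--             if i==party:
--                 if localhost:
--                     ios[j] = 2*(i*n+j)
--                 else:
--                     ios[j] = 2*i
--
--                 if localhost:
--                     ios2[j] = 2*(i*n+j)
--                 else:
--                     ios2[j] = 2*i
--             elif j==party:
--                 if localhost:
--                     ios[i] = 2*(i*n+j)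
--                 else:
--                     ios[i] = 2*i
--
--                 if localhost:
--                     ios2[i] = 2*(i*n+j)
--                 else:
--                     ios2[i] = 2*i
--     return ios, ios2
-- ===== SOURCE B (Python) =====
-- def netmp_sim(n = 4, party = 0, localhost = False):
--     in_range = 0 <= party < n
--
--     def val(k):
--         if k == party or not in_range:
--             return -1
--         lo, hi = min(party, k), max(party, k)
--         return 2 * (lo * n + hi) if localhost else 2 * lo
--
--     ios = [val(k) for k in range(n)]
--     return ios, list(ios)
-- ===== Notes on version B (the rewrite author's own statement) =====
-- stated objective: faster
-- what changed: Replaces the O(n^2) double loop over all pairs (i,j) that mutates two -1-filled arrays with a single closed-form comprehension computing each entry directly from min/max of (party,k), building the list once.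
import Mathlib
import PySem

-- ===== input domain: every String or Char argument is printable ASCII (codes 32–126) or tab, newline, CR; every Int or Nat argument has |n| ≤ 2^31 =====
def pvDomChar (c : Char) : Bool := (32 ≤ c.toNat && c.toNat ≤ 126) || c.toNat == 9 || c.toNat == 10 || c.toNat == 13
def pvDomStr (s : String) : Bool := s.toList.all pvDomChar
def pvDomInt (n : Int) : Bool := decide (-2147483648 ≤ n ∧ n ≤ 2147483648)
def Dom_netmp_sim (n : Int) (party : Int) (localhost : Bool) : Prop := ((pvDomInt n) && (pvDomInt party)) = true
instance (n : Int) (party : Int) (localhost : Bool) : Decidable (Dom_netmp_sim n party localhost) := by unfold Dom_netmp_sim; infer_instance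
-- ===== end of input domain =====

-- B replaces A's quadratic pairwise double loop by a single closed-form comprehension; the return values are proved equal on all inputs.

-- ===== PORT A =====
-- inner-loop body of A over the pair state (ios, ios2); literal transcription of A's branch structure
def netmpInnerBody (n party : Int) (localhost : Bool) (st : List Int × List Int) (i j : Int) :
    List Int × List Int :=
  if i = party then
    ( if localhost then PySem.List.pySetD st.1 j (2*(i*n+j)) else PySem.List.pySetD st.1 j (2*i),
      if localhost then PySem.List.pySetD st.2 j (2*(i*n+j)) else PySem.List.pySetD st.2 j (2*i) )
  else if j = party then
    ( if localhost then PySem.List.pySetD st.1 i (2*(i*n+j)) else PySem.List.pySetD st.1 i (2*i),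
      if localhost then PySem.List.pySetD st.2 i (2*(i*n+j)) else PySem.List.pySetD st.2 i (2*i) )
  else st

def netmp_sim (n : Int) (party : Int) (localhost : Bool) : List Int × List Int :=
  let ios := (PySem.List.pyRange 0 n 1).map (fun _ => (-1 : Int))
  let ios2 := (PySem.List.pyRange 0 n 1).map (fun _ => (-1 : Int))
  (PySem.List.pyRange 0 n 1).foldl
    (fun st i =>
      (PySem.List.pyRange (i+1) n 1).foldl (fun st j => netmpInnerBody n party localhost st i j) st)
    (ios, ios2)

-- ===== PORT B =====
def netmpVal (n party : Int) (localhost : Bool) (k : Int) : Int :=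
  if k = party ∨ ¬ (0 ≤ party ∧ party < n) then -1
  else if localhost then 2 * ((min party k) * n + max party k) else 2 * (min party k)

def netmp_sim_alt (n : Int) (party : Int) (localhost : Bool) : List Int × List Int :=
  let ios := (PySem.List.pyRange 0 n 1).map (netmpVal n party localhost)
  (ios, ios)

-- ===== PRECONDITION & SPEC =====
def Spec_netmp_sim (n : Int) (party : Int) (localhost : Bool) (out : List Int × List Int) : Prop := out = netmp_sim_alt n party localhost
instance (n : Int) (party : Int) (localhost : Bool) (out : List Int × List Int) : Decidable (Spec_netmp_sim n party localhost out) := by unfold Spec_netmp_sim; infer_instance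

-- ===== CLAIM (what is proved, stated in full; the proofs are below) =====
def Claim_equal_netmp_sim : Prop := ∀ (n : Int) (party : Int) (localhost : Bool), Dom_netmp_sim n party localhost → Spec_netmp_sim n party localhost (netmp_sim n party localhost)

-- ===== LEMMAS AND PROOFS =====

-- single-list version of A's inner-loop body (ios and ios2 evolve identically)
def netmpG (n party : Int) (localhost : Bool) (st : List Int) (i j : Int) : List Int :=
  if i = party then (if localhost then PySem.List.pySetD st j (2*(i*n+j)) else PySem.List.pySetD st j (2*i))
  else if j = party then (if localhost then PySem.List.pySetD st i (2*(i*n+j)) else PySem.List.pySetD st i (2*i))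
  else st

theorem netmpInnerBody_pair (n party : Int) (localhost : Bool) (x : List Int) (i j : Int) :
    netmpInnerBody n party localhost (x, x) i j = (netmpG n party localhost x i j, netmpG n party localhost x i j) := by
  simp only [netmpInnerBody, netmpG]
  split_ifs <;> rfl

theorem inner_pair (n party : Int) (localhost : Bool) (i : Int) (l : List Int) (x : List Int) :
    l.foldl (fun st j => netmpInnerBody n party localhost st i j) (x, x) =
      (l.foldl (fun st j => netmpG n party localhost st i j) x,
       l.foldl (fun st j => netmpG n party localhost st i j) x) := by
  induction l generalizing x with
  | nil => rfl
  | cons a t ih => simp only [List.foldl_cons, netmpInnerBody_pair]; exact ih _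

theorem outer_pair (n party : Int) (localhost : Bool) (l : List Int) (x : List Int) :
    l.foldl (fun st i => (PySem.List.pyRange (i+1) n 1).foldl (fun st j => netmpInnerBody n party localhost st i j) st) (x, x) =
      (l.foldl (fun st i => (PySem.List.pyRange (i+1) n 1).foldl (fun st j => netmpG n party localhost st i j) st) x,
       l.foldl (fun st i => (PySem.List.pyRange (i+1) n 1).foldl (fun st j => netmpG n party localhost st i j) st) x) := by
  induction l generalizing x with
  | nil => rfl
  | cons a t ih => simp only [List.foldl_cons, inner_pair]; exact ih _

theorem length_netmpG (n party : Int) (localhost : Bool) (st : List Int) (i j : Int) :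
    (netmpG n party localhost st i j).length = st.length := by
  simp only [netmpG]; split_ifs <;> simp [PySem.List.length_pySetD]

theorem length_inner (n party : Int) (localhost : Bool) (i : Int) (l : List Int) (st : List Int) :
    (l.foldl (fun st j => netmpG n party localhost st i j) st).length = st.length := by
  induction l generalizing st with
  | nil => rfl
  | cons a t ih => simp only [List.foldl_cons]; rw [ih, length_netmpG]

theorem length_outer (n party : Int) (localhost : Bool) (l : List Int) (st : List Int) :
    (l.foldl (fun st i => (PySem.List.pyRange (i+1) n 1).foldl (fun st j => netmpG n party localhost st i j) st) st).length = st.length := by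
  induction l generalizing st with
  | nil => rfl
  | cons a t ih => simp only [List.foldl_cons]; rw [ih, length_inner]

theorem pySetD_getElem? (st : List Int) (idx : Int) (h0 : 0 ≤ idx) (v : Int) (m : Nat) :
    (PySem.List.pySetD st idx v)[m]? = if ((m:Int) = idx ∧ m < st.length) then some v else st[m]? := by
  rw [PySem.List.pySetD_of_nonneg _ _ h0]
  simp only [List.getElem?_set]
  split_ifs <;> first | rfl | omega | (rw [List.getElem?_eq_none (by omega)])

-- the value A writes into cell m (min party m is the smaller pair index)
def netmpW (n party : Int) (localhost : Bool) (k : Int) : Int :=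
  if localhost then 2 * ((min party k) * n + max party k) else 2 * (min party k)

theorem inner_get (n party : Int) (localhost : Bool) (i : Int) (hi : 0 ≤ i)
    (c : Int) (hc : i < c) (st : List Int) (hlen : st.length = n.toNat) (m : Nat) :
    ((PySem.List.pyRange c n 1).foldl (fun st j => netmpG n party localhost st i j) st)[m]? =
      (if i = party ∧ c ≤ (m:Int) ∧ (m:Int) < n then some (netmpW n party localhost m)
       else if i ≠ party ∧ (m:Int) = i ∧ c ≤ party ∧ party < n then some (netmpW n party localhost i)
       else st[m]?) := by
  by_cases hcn : n ≤ c
  · rw [PySem.List.pyRange_one_eq_nil hcn]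
    simp only [List.foldl_nil]
    split_ifs <;> first | omega | rfl
  · push_neg at hcn
    rw [PySem.List.pyRange_one_cons hcn]
    simp only [List.foldl_cons]
    have hlen' : (netmpG n party localhost st i c).length = n.toNat := by
      rw [length_netmpG]; exact hlen
    rw [inner_get n party localhost i hi (c+1) (by omega) _ hlen' m]
    by_cases hip : i = party
    · subst hip
      have hg : (netmpG n i localhost st i c)[m]? =
          if ((m:Int) = c ∧ m < st.length) then some (if localhost then 2*(i*n+c) else 2*i) else st[m]? := by
        simp only [netmpG, if_pos rfl]
        cases localhost <;>
          simp only [if_true, if_false, Bool.false_eq_true, cond_eq_if] <;>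
          rw [pySetD_getElem? st c (by omega)] <;> split_ifs <;> rfl
      by_cases hmc : (m:Int) = c
      · have hW : netmpW n i localhost m = if localhost then 2*(i*n+c) else 2*i := by
          have h1 : min i ((m:Nat):Int) = i := by omega
          have h2 : max i ((m:Nat):Int) = c := by omega
          simp only [netmpW, h1, h2]
        rw [← hW] at hg
        rw [hg]
        split_ifs <;> first | omega | rfl
      · rw [hg]
        split_ifs <;> first | omega | rfl
    · have hg : (netmpG n party localhost st i c)[m]? =
          if (c = party ∧ (m:Int) = i ∧ m < st.length) then some (if localhost then 2*(i*n+c) else 2*i) else st[m]? := by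
        simp only [netmpG, if_neg hip]
        by_cases hcp : c = party
        · simp only [if_pos hcp]
          cases localhost <;>
            simp only [if_true, if_false, Bool.false_eq_true] <;>
            rw [pySetD_getElem? st i hi] <;> split_ifs <;> first | rfl | omega
        · simp only [if_neg hcp]
          split_ifs <;> first | rfl | omega
      by_cases hcp : c = party
      · subst hcp
        have hW : netmpW n c localhost i = if localhost then 2*(i*n+c) else 2*i := by
          have h1 : min c i = i := by omega
          have h2 : max c i = c := by omega
          simp only [netmpW, h1, h2]
        rw [← hW] at hg
        rw [hg]
        split_ifs <;> first | omega | rfl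
      · rw [hg]
        split_ifs <;> first | omega | rfl
  termination_by (n - c).toNat
  decreasing_by omega

theorem outer_get (n party : Int) (localhost : Bool) (a : Int) (ha : 0 ≤ a)
    (st : List Int) (hlen : st.length = n.toNat) (m : Nat) (hm : m < st.length) :
    ((PySem.List.pyRange a n 1).foldl
        (fun st i => (PySem.List.pyRange (i+1) n 1).foldl (fun st j => netmpG n party localhost st i j) st) st)[m]? =
      (if 0 ≤ party ∧ party < n ∧ (m:Int) ≠ party ∧ a ≤ (m:Int) ∧ a ≤ party then some (netmpW n party localhost m)
       else st[m]?) := by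
  by_cases han : n ≤ a
  · rw [PySem.List.pyRange_one_eq_nil han]
    simp only [List.foldl_nil]
    split_ifs <;> first | omega | rfl
  · push_neg at han
    rw [PySem.List.pyRange_one_cons han]
    simp only [List.foldl_cons]
    have hlenI : ((PySem.List.pyRange (a+1) n 1).foldl (fun st j => netmpG n party localhost st a j) st).length = n.toNat := by
      rw [length_inner]; exact hlen
    rw [outer_get n party localhost (a+1) (by omega) _ hlenI m (by omega)]
    rw [inner_get n party localhost a ha (a+1) (by omega) st hlen m]
    split_ifs <;> first | rfl | omega |
      (exact congrArg (fun z => some (netmpW n party localhost z)) ((by omega : ((m:Nat):Int) = a)).symm)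
  termination_by (n - a).toNat
  decreasing_by omega

theorem netmp_core (n party : Int) (localhost : Bool) :
    (PySem.List.pyRange 0 n 1).foldl
        (fun st i => (PySem.List.pyRange (i+1) n 1).foldl (fun st j => netmpG n party localhost st i j) st)
        ((PySem.List.pyRange 0 n 1).map (fun _ => (-1 : Int))) =
      (PySem.List.pyRange 0 n 1).map (netmpVal n party localhost) := by
  have hlr : (PySem.List.pyRange 0 n 1).length = n.toNat := by
    rw [PySem.List.length_pyRange_one]; norm_num
  have hleninit : ((PySem.List.pyRange 0 n 1).map (fun _ => (-1 : Int))).length = n.toNat := by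
    rw [List.length_map, hlr]
  apply List.ext_getElem?
  intro m
  by_cases hm : m < n.toNat
  · rw [outer_get n party localhost 0 le_rfl _ hleninit m (by omega)]
    have hr : (PySem.List.pyRange 0 n 1)[m]? = some ((0:Int) + m) := by
      rw [PySem.List.getElem?_pyRange_one]
      rw [if_pos (by omega)]
    rw [List.getElem?_map, List.getElem?_map, hr]
    simp only [Option.map_some]
    have : netmpVal n party localhost ((0:Int) + m) =
        if 0 ≤ party ∧ party < n ∧ (m:Int) ≠ party ∧ 0 ≤ (m:Int) ∧ 0 ≤ party then netmpW n party localhost m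
        else -1 := by
      simp only [netmpVal, netmpW, zero_add]
      split_ifs <;> first | rfl | omega
    rw [this]
    split_ifs <;> rfl
  · have h1 : ((PySem.List.pyRange 0 n 1).foldl
        (fun st i => (PySem.List.pyRange (i+1) n 1).foldl (fun st j => netmpG n party localhost st i j) st)
        ((PySem.List.pyRange 0 n 1).map (fun _ => (-1 : Int)))).length = n.toNat := by
      rw [length_outer]; exact hleninit
    rw [List.getElem?_eq_none (by omega), List.getElem?_eq_none (by rw [List.length_map, hlr]; omega)]

-- ===== VERDICT (by name: the statement is the Claim_ definition above) =====
theorem netmp_sim_spec : Claim_equal_netmp_sim := by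
  intro n party localhost _
  unfold Spec_netmp_sim netmp_sim netmp_sim_alt
  simp only []
  rw [outer_pair, netmp_core]
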